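-- pv_equiv track=rewrite | github.com/JonissonGSilva/RetroGalatica | app.py | buscar_posicao_jogador
-- ===== SOURCE A (Python) =====
-- from typing import Dict, List, Tuple, Optional
--
-- def buscar_posicao_jogador(nome: str, players: List[Dict]) -> Optional[str]:
--     """
--     Busca a posição de um jogador no players.json.
--     Retorna a posição normalizada (ZAG, MEI, ATA, PE, LD) ou None.
--     Aceita busca parcial por nome.
--     """
--     nome_normalizado = nome.strip().lower()
--     palavras_nome = nome_normalizado.split()
--
--     # Primeiro tenta match exato
--     for player in players:
--         full_name = player.get('fullName', '').strip()
--         full_name_lower = full_name.lower()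
--
--         # Match exato
--         if full_name_lower == nome_normalizado:
--             return extrair_posicao_normalizada(player)
--
--         # Match por palavras (ex: "Luiz" encontra "Luiz Kelvin")
--         if palavras_nome:
--             if all(palavra in full_name_lower for palavra in palavras_nome):
--                 return extrair_posicao_normalizada(player)
--
--     # Se não encontrou, tenta match parcial (primeira palavra)
--     if palavras_nome:
--         primeira_palavra = palavras_nome[0]
--         for player in players:
--             full_name = player.get('fullName', '').strip().lower()
--             if full_name.startswith(primeira_palavra) or primeira_palavra in full_name:
--                 return extrair_posicao_normalizada(player)
--
--     return None
--
-- def extrair_posicao_normalizada(player: Dict) -> str: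
--     """
--     Extrai e normaliza a posição de um jogador.
--     """
--     position = player.get('position', '').strip()
--     prize_draw_position = player.get('prizeDrawPosition', '').strip()
--
--     # Prioriza prizeDrawPosition se existir
--     posicao_final = prize_draw_position if prize_draw_position else position
--
--     # Normaliza a posição
--     posicao_lower = posicao_final.lower()
--     if 'zagueiro' in posicao_lower or 'lateral' in posicao_lower:
--         return 'ZAG'
--     elif 'meia' in posicao_lower or 'volante' in posicao_lower:
--         return 'MEI'
--     elif 'atacante' in posicao_lower or 'ponta' in posicao_lower:
--         return 'ATA'
--     elif 'ponta esquerda' in posicao_lower or 'ponta direita' in posicao_lower: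
--         return 'ATA'  # PE é tratado como ATA
--     elif 'lateral direito' in posicao_lower or 'lateral esquerdo' in posicao_lower:
--         return 'ZAG'  # LD é tratado como ZAG
--
--     return posicao_final
-- ===== SOURCE B (Python) =====
-- from typing import Dict, List, Optional
--
-- _POS_RULES = [
--     ('zagueiro', 'ZAG'), ('lateral', 'ZAG'),
--     ('meia', 'MEI'), ('volante', 'MEI'),
--     ('atacante', 'ATA'), ('ponta', 'ATA'),
-- ]
--
-- def extrair_posicao_normalizada(player: Dict) -> str:
--     position = player.get('position', '').strip()
--     prize_draw_position = player.get('prizeDrawPosition', '').strip()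
--     posicao_final = prize_draw_position if prize_draw_position else position
--     posicao_lower = posicao_final.lower()
--     for key, code in _POS_RULES:
--         if key in posicao_lower:
--             return code
--     return posicao_final
--
-- def buscar_posicao_jogador(nome: str, players: List[Dict]) -> Optional[str]:
--     nome_normalizado = nome.strip().lower()
--     palavras_nome = nome_normalizado.split()
--     fallback = None
--     for player in players:
--         full_name_lower = player.get('fullName', '').strip().lower()
--         if full_name_lower == nome_normalizado or (
--             palavras_nome and all(p in full_name_lower for p in palavras_nome)
--         ):
--             return extrair_posicao_normalizada(player)
--         if fallback is None and palavras_nome and palavras_nome[0] in full_name_lower: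
--             fallback = player
--     return extrair_posicao_normalizada(fallback) if fallback is not None else None
-- ===== Notes on version B (the rewrite author's own statement) =====
-- stated objective: simpler
-- what changed: Replaced A's two sequential scans (exact/all-words pass, then a second first-word pass) by one scan with a first-match fallback variable, dropped the redundant startswith test and the two unreachable position branches, and replaced the if/elif position chain by a rule table scanned for the first matching substring.
import Mathlib
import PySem

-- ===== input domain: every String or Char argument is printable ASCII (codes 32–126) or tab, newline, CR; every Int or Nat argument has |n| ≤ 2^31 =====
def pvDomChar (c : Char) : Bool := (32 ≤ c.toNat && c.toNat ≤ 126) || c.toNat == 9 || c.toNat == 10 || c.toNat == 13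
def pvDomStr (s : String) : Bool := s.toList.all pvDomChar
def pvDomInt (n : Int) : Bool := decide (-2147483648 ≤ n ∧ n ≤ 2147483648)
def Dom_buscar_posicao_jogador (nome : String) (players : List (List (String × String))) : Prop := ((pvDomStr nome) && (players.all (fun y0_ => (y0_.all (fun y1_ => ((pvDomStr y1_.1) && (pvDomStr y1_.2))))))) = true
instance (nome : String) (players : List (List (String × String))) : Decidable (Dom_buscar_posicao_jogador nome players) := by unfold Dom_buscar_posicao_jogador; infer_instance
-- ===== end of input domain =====

-- B: single scan with a first-match fallback instead of A's two passes; position chain as a rule table. Same results.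


-- player.get(k, '') : first matching key (association list), default "" — shared by both ports
def pvGet (player : List (String × String)) (k : String) : String :=
  (PySem.Dict.mk player).getD k ""

-- ===== PORT A =====

-- extrair_posicao_normalizada, A's if/elif chain
def extrairA (player : List (String × String)) : String :=
  let position := PySem.Str.strip (pvGet player "position")
  let prize := PySem.Str.strip (pvGet player "prizeDrawPosition")
  let posicao_final := if prize ≠ "" then prize else position
  let pl := PySem.Str.lower posicao_final
  if PySem.Str.isIn "zagueiro" pl = true ∨ PySem.Str.isIn "lateral" pl = true then "ZAG"
  else if PySem.Str.isIn "meia" pl = true ∨ PySem.Str.isIn "volante" pl = true then "MEI"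
  else if PySem.Str.isIn "atacante" pl = true ∨ PySem.Str.isIn "ponta" pl = true then "ATA"
  else if PySem.Str.isIn "ponta esquerda" pl = true ∨ PySem.Str.isIn "ponta direita" pl = true then "ATA"
  else if PySem.Str.isIn "lateral direito" pl = true ∨ PySem.Str.isIn "lateral esquerdo" pl = true then "ZAG"
  else posicao_final

-- A's first loop: exact match / all-words match
def loopA1 (nn : String) (palavras : List String) : List (List (String × String)) → Option String
  | [] => none
  | p :: ps =>
    let fnl := PySem.Str.lower (PySem.Str.strip (pvGet p "fullName"))
    if fnl = nn then some (extrairA p)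
    else if palavras ≠ [] ∧ (palavras.all fun w => PySem.Str.isIn w fnl) = true then some (extrairA p)
    else loopA1 nn palavras ps

-- A's second loop: first word startswith / substring
def loopA2 (pw : String) : List (List (String × String)) → Option String
  | [] => none
  | p :: ps =>
    let fnl := PySem.Str.lower (PySem.Str.strip (pvGet p "fullName"))
    if PySem.Str.startswith fnl pw = true ∨ PySem.Str.isIn pw fnl = true then some (extrairA p)
    else loopA2 pw ps

def buscar_posicao_jogador (nome : String) (players : List (List (String × String))) : Option String :=
  let nn := PySem.Str.lower (PySem.Str.strip nome)
  let palavras := PySem.Str.split₀ nn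
  match loopA1 nn palavras players with
  | some r => some r
  | none =>
    match palavras with
    | [] => none
    | pw :: _ => loopA2 pw players

-- ===== PORT B =====
def posRules : List (String × String) :=
  [("zagueiro", "ZAG"), ("lateral", "ZAG"), ("meia", "MEI"), ("volante", "MEI"), ("atacante", "ATA"), ("ponta", "ATA")]

-- B's extrair: first rule whose key is a substring, else the raw position
def extrairB (player : List (String × String)) : String :=
  let position := PySem.Str.strip (pvGet player "position")
  let prize := PySem.Str.strip (pvGet player "prizeDrawPosition")
  let posicao_final := if prize ≠ "" then prize else position
  let pl := PySem.Str.lower posicao_final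
  ((posRules.find? (fun r => PySem.Str.isIn r.1 pl)).map Prod.snd).getD posicao_final

-- B's single loop carrying the fallback
def loopB (nn : String) (palavras : List String) : List (List (String × String)) → Option (List (String × String)) → Option String
  | [], fb =>
    match fb with
    | some q => some (extrairB q)
    | none => none
  | p :: ps, fb =>
    let fnl := PySem.Str.lower (PySem.Str.strip (pvGet p "fullName"))
    if fnl = nn ∨ (palavras ≠ [] ∧ (palavras.all fun w => PySem.Str.isIn w fnl) = true) then
      some (extrairB p)
    else
      loopB nn palavras ps
        (if fb = none ∧ palavras ≠ [] ∧ PySem.Str.isIn (palavras.headD "") fnl = true then some p else fb)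

def buscar_posicao_jogador_alt (nome : String) (players : List (List (String × String))) : Option String :=
  let nn := PySem.Str.lower (PySem.Str.strip nome)
  loopB nn (PySem.Str.split₀ nn) players none

-- ===== PRECONDITION & SPEC =====
def Spec_buscar_posicao_jogador (nome : String) (players : List (List (String × String))) (out : Option String) : Prop := out = buscar_posicao_jogador_alt nome players
instance (nome : String) (players : List (List (String × String))) (out : Option String) : Decidable (Spec_buscar_posicao_jogador nome players out) := by unfold Spec_buscar_posicao_jogador; infer_instance

-- ===== CLAIM (what is proved, stated in full; the proofs are below) =====
def Claim_equal_buscar_posicao_jogador : Prop := ∀ (nome : String) (players : List (List (String × String))), Dom_buscar_posicao_jogador nome players → Spec_buscar_posicao_jogador nome players (buscar_posicao_jogador nome players)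

-- ===== LEMMAS AND PROOFS =====

-- substring monotonicity: an occurrence of sub is an occurrence of any substring sub' of sub
theorem isIn_of_isIn_of_infix (sub sub' s : String)
    (hs : sub'.toList <:+: sub.toList) (h : PySem.Str.isIn sub s = true) :
    PySem.Str.isIn sub' s = true := by
  rw [PySem.Str.isIn_iff_infix] at h ⊢
  exact hs.trans h

-- a prefix occurrence is a substring occurrence, so A's `startswith` disjunct is absorbed
theorem startswith_imp_isIn (s w : String)
    (h : PySem.Str.startswith s w = true) : PySem.Str.isIn w s = true := by
  rw [PySem.Str.isIn_iff_infix]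
  exact ((PySem.Chars.startswith_iff s.toList w.toList).mp (by simpa using h)).isInfix

-- A's if/elif chain equals B's table scan (A's 4th and 5th branches are unreachable)
set_option maxHeartbeats 2000000 in
theorem chain_table (pl pf : String) :
    (if PySem.Str.isIn "zagueiro" pl = true ∨ PySem.Str.isIn "lateral" pl = true then "ZAG"
     else if PySem.Str.isIn "meia" pl = true ∨ PySem.Str.isIn "volante" pl = true then "MEI"
     else if PySem.Str.isIn "atacante" pl = true ∨ PySem.Str.isIn "ponta" pl = true then "ATA"
     else if PySem.Str.isIn "ponta esquerda" pl = true ∨ PySem.Str.isIn "ponta direita" pl = true then "ATA"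
     else if PySem.Str.isIn "lateral direito" pl = true ∨ PySem.Str.isIn "lateral esquerdo" pl = true then "ZAG"
     else pf) =
    ((posRules.find? (fun r => PySem.Str.isIn r.1 pl)).map Prod.snd).getD pf := by
  have hpe : PySem.Str.isIn "ponta esquerda" pl = true → PySem.Str.isIn "ponta" pl = true :=
    isIn_of_isIn_of_infix _ _ _ (by decide)
  have hpd : PySem.Str.isIn "ponta direita" pl = true → PySem.Str.isIn "ponta" pl = true :=
    isIn_of_isIn_of_infix _ _ _ (by decide)
  have hld : PySem.Str.isIn "lateral direito" pl = true → PySem.Str.isIn "lateral" pl = true :=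
    isIn_of_isIn_of_infix _ _ _ (by decide)
  have hle : PySem.Str.isIn "lateral esquerdo" pl = true → PySem.Str.isIn "lateral" pl = true :=
    isIn_of_isIn_of_infix _ _ _ (by decide)
  cases hz : PySem.Str.isIn "zagueiro" pl <;>
  cases hl : PySem.Str.isIn "lateral" pl <;>
  cases hm : PySem.Str.isIn "meia" pl <;>
  cases hv : PySem.Str.isIn "volante" pl <;>
  cases ha : PySem.Str.isIn "atacante" pl <;>
  cases hp : PySem.Str.isIn "ponta" pl <;>
  simp_all [posRules, List.find?]

-- the two extractors agree
theorem extrair_eq (p : List (String × String)) : extrairA p = extrairB p := by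
  simp only [extrairA, extrairB]
  rw [chain_table]

-- the single fallback-carrying scan equals A's two scans
theorem loopB_eq (nn : String) (palavras : List String)
    (ps : List (List (String × String))) (fb : Option (List (String × String))) :
    loopB nn palavras ps fb =
      match loopA1 nn palavras ps with
      | some r => some r
      | none =>
        match fb with
        | some q => some (extrairB q)
        | none =>
          match palavras with
          | [] => none
          | pw :: _ => loopA2 pw ps := by
  induction ps generalizing fb with
  | nil => cases fb <;> cases palavras <;> rfl
  | cons p ps ih =>
    simp only [loopB, loopA1, loopA2]
    set fnl := PySem.Str.lower (PySem.Str.strip (pvGet p "fullName")) with hfnl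
    by_cases hx : fnl = nn
    · rw [if_pos (Or.inl hx), if_pos hx, extrair_eq]
    · by_cases hw : palavras ≠ [] ∧ (palavras.all fun w => PySem.Str.isIn w fnl) = true
      · rw [if_pos (Or.inr hw), if_neg hx, if_pos hw, extrair_eq]
      · rw [if_neg (not_or.mpr ⟨hx, hw⟩), if_neg hx, if_neg hw]
        cases fb with
        | some q =>
          rw [if_neg (show ¬((some q : Option (List (String × String))) = none ∧
              palavras ≠ [] ∧ PySem.Str.isIn (palavras.headD "") fnl = true)
              from fun h => absurd h.1 (Option.some_ne_none q)), ih]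
        | none =>
          cases palavras with
          | nil =>
            rw [if_neg (show ¬((none : Option (List (String × String))) = none ∧
                ([] : List String) ≠ [] ∧ PySem.Str.isIn (([] : List String).headD "") fnl = true)
                from fun h => h.2.1 rfl), ih]
          | cons w ws =>
            by_cases h2 : PySem.Str.isIn w fnl = true
            · rw [if_pos (show (none : Option (List (String × String))) = none ∧
                  w :: ws ≠ [] ∧ PySem.Str.isIn ((w :: ws).headD "") fnl = true
                  from ⟨rfl, List.cons_ne_nil w ws, h2⟩), ih]
              cases hA : loopA1 nn (w :: ws) ps with
              | some r => rfl
              | none =>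
                show some (extrairB p) =
                  if PySem.Str.startswith fnl w = true ∨ PySem.Str.isIn w fnl = true then
                    some (extrairA p) else loopA2 w ps
                rw [if_pos (Or.inr h2), extrair_eq]
            · have hst : PySem.Str.startswith fnl w = false := by
                cases hb : PySem.Str.startswith fnl w
                · rfl
                · exact absurd (startswith_imp_isIn _ _ hb) h2
              have h2' : PySem.Str.isIn w fnl = false := by
                cases hb : PySem.Str.isIn w fnl
                · rfl
                · exact absurd hb h2
              rw [if_neg (show ¬((none : Option (List (String × String))) = none ∧
                  w :: ws ≠ [] ∧ PySem.Str.isIn ((w :: ws).headD "") fnl = true)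
                  from fun h => h2 h.2.2), ih]
              cases hA : loopA1 nn (w :: ws) ps with
              | some r => rfl
              | none =>
                show loopA2 w ps =
                  if PySem.Str.startswith fnl w = true ∨ PySem.Str.isIn w fnl = true then
                    some (extrairA p) else loopA2 w ps
                rw [if_neg (not_or.mpr ⟨fun hb => Bool.false_ne_true (hst ▸ hb), h2⟩)]

-- ===== VERDICT (by name: the statement is the Claim_ definition above) =====
theorem buscar_posicao_jogador_spec : Claim_equal_buscar_posicao_jogador := by
  intro nome players _
  unfold Spec_buscar_posicao_jogador buscar_posicao_jogador buscar_posicao_jogador_alt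
  rw [loopB_eq]
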